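-- pv_equiv track=rewrite | github.com/mkstp/legal-provisions-analyzer | helpers.py | check_similar
-- ===== SOURCE A (Python) =====
-- from collections import Counter
--
-- def check_similar(search_text, compare_text):
--     # returns the score as an integer which represents the number of hits
--     x_list = set(search_text.split())
--     y_dict = Counter(compare_text.split())
--     score = 0
--     for word in x_list:  # this should be a set; wrap it in the set function; considered a logic error
--         if word in y_dict:
--             score += y_dict[word]
--     return score
-- ===== SOURCE B (Python) =====
-- def check_similar(search_text, compare_text):
--     # returns the score as an integer which represents the number of hits
--     search_words = search_text.split()
--     score = 0
--     for word in compare_text.split():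
--         if word in search_words:
--             score += 1
--     return score
-- ===== Notes on version B (the rewrite author's own statement) =====
-- stated objective: simpler
-- what changed: Instead of building a set of search words and a Counter of compare tokens and summing counts over the distinct search words, B keeps the raw search word list and makes one accumulator pass over the compare tokens (with multiplicity), adding 1 per token found among the search words; no set and no count table are built.
import Mathlib
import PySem

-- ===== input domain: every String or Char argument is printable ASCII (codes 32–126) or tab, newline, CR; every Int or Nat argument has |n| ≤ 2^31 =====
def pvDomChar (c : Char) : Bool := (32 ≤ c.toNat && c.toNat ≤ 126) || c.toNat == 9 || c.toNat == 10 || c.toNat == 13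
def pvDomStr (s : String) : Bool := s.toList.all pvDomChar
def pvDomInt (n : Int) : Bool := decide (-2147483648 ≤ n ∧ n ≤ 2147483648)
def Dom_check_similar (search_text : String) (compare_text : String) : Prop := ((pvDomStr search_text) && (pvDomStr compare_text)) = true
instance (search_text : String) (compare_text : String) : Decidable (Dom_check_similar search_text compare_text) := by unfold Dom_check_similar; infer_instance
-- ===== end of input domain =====

-- B drops both the set and the Counter: one accumulator pass over the compare
-- tokens, testing membership in the raw search-word list (simpler decomposition).


-- ===== PORT A =====
-- the loop over the set x_list only SUMS, so its result is independent of the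
-- (unmodelled) Python set iteration order
def check_similar (search_text : String) (compare_text : String) : Int :=
  let x_list : PySem.Set String := PySem.Set.ofList (PySem.Str.split₀ search_text)
  let y_dict : PySem.Dict String Int := PySem.Dict.counter (PySem.Str.split₀ compare_text)
  x_list.foldl
    (fun score word =>
      if y_dict.contains word then score + y_dict.getD word 0 else score) 0

-- ===== PORT B =====
-- the 'for word in compare_text.split()' accumulator loop of Source B
def pvHitLoop (search_words : List String) : List String → Int → Int
  | [], score => score
  | word :: rest, score =>
      pvHitLoop search_words rest (if word ∈ search_words then score + 1 else score)

def check_similar_alt (search_text : String) (compare_text : String) : Int :=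
  pvHitLoop (PySem.Str.split₀ search_text) (PySem.Str.split₀ compare_text) 0

-- ===== PRECONDITION & SPEC =====
def Spec_check_similar (search_text : String) (compare_text : String) (out : Int) : Prop := out = check_similar_alt search_text compare_text
instance (search_text : String) (compare_text : String) (out : Int) : Decidable (Spec_check_similar search_text compare_text out) := by unfold Spec_check_similar; infer_instance

-- ===== CLAIM (what is proved, stated in full; the proofs are below) =====
def Claim_equal_check_similar : Prop := ∀ (search_text : String) (compare_text : String), Dom_check_similar search_text compare_text → Spec_check_similar search_text compare_text (check_similar search_text compare_text)

-- ===== LEMMAS AND PROOFS =====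

-- B's accumulator loop counts the compare tokens lying in the search-word list
theorem pv_hitLoop_eq_countP (sw ys : List String) (a : Int) :
    pvHitLoop sw ys a = a + (ys.countP (fun y => decide (y ∈ sw)) : Int) := by
  induction ys generalizing a with
  | nil => simp [pvHitLoop]
  | cons y ys ih =>
    rw [pvHitLoop, ih, List.countP_cons]
    by_cases h : y ∈ sw <;> simp [h] <;> omega

-- splitting the membership predicate at the head of a duplicate-free list
theorem pv_countP_cons_mem (w : String) (xs ys : List String) (hw : w ∉ xs) :
    ys.countP (fun y => decide (y = w) || decide (y ∈ xs))
      = ys.count w + ys.countP (fun y => decide (y ∈ xs)) := by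
  induction ys with
  | nil => rfl
  | cons y ys ih =>
    simp only [List.countP_cons, List.count_cons, ih]
    by_cases h : y = w
    · subst h
      have hx : y ∉ xs := hw
      simp [hx]
      omega
    · by_cases hx : y ∈ xs <;> simp [h, hx]
      omega

-- A's fold over the duplicate-free word list equals counting the compare tokens in xs
theorem pv_fold_eq_countP (xs ys : List String) (h : xs.Nodup) (a : Int) :
    xs.foldl
      (fun score word =>
        if (PySem.Dict.counter ys).contains word then
          score + (PySem.Dict.counter ys).getD word 0
        else score) a
      = a + (ys.countP (fun y => decide (y ∈ xs)) : Int) := by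
  induction xs generalizing a with
  | nil => simp
  | cons w xs ih =>
    have hw : w ∉ xs := (List.nodup_cons.mp h).1
    have hnd : xs.Nodup := (List.nodup_cons.mp h).2
    have hfun : (fun y : String => decide (y ∈ w :: xs))
        = (fun y => decide (y = w) || decide (y ∈ xs)) := by
      funext y; simp [List.mem_cons]
    rw [List.foldl_cons, ih hnd, hfun, pv_countP_cons_mem w xs ys hw]
    by_cases hc : (PySem.Dict.counter ys).contains w = true
    · have hg : (PySem.Dict.counter ys).getD w 0 = (ys.count w : Int) :=
        PySem.Dict.getD_counter ys w
      rw [if_pos hc, hg]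
      push_cast
      ring
    · have hmem : w ∉ ys := by
        have hcc := PySem.Dict.contains_counter ys w
        simp only [Bool.not_eq_true] at hc
        rw [hc] at hcc
        simpa using hcc.symm
      have hz : ys.count w = 0 := List.count_eq_zero.mpr hmem
      rw [if_neg (by simp [hc]), hz]
      simp

-- ===== VERDICT (by name: the statement is the Claim_ definition above) =====
theorem check_similar_spec : Claim_equal_check_similar := by
  intro s c _
  unfold Spec_check_similar check_similar check_similar_alt
  dsimp only
  rw [pv_fold_eq_countP _ _ (PySem.Set.nodup_ofList _) 0,
      pv_hitLoop_eq_countP, zero_add, zero_add]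
  congr 1
  apply List.countP_congr
  intro y _
  simp [PySem.Set.mem_ofList]
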